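-- pv_equiv track=rewrite | github.com/nirankusha/ENLENS_Crossodoc | app_crossdoc2.py | _filter_rows_by_terms
-- ===== SOURCE A (Python) =====
-- from typing import Dict, List, Any, Optional, Iterable, Callable
--
-- def _filter_rows_by_terms(rows: List[Dict[str, Any]], terms: List[str], mode: str="AND") -> List[Dict[str, Any]]:
--     """In-memory AND/OR substring match over 'text' (case-insensitive)."""
--     if not rows or not terms:
--         return []
--     tnorm = [t.strip().lower() for t in terms if t and t.strip()]
--     if not tnorm:
--         return []
--     out = []
--     for r in rows:
--         txt = (r.get("text") or "").lower()
--         hits = [(t in txt) for t in tnorm]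
--         ok = all(hits) if mode == "AND" else any(hits)
--         if ok:
--             out.append(r)
--     return out
-- ===== SOURCE B (Python) =====
-- from typing import Dict, List, Any
--
-- def _filter_rows_by_terms(rows: List[Dict[str, Any]], terms: List[str], mode: str = "AND") -> List[Dict[str, Any]]:
--     """Term-major rewrite: lower each row's text once, then sweep a per-row
--     boolean accumulator over the terms and select the surviving rows."""
--     if not rows or not terms:
--         return []
--     tnorm = [t.strip().lower() for t in terms if t and t.strip()]
--     if not tnorm:
--         return []
--     texts = [(r.get("text") or "").lower() for r in rows]
--     conj = (mode == "AND")
--     acc = [conj] * len(rows)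
--     for t in tnorm:
--         if conj:
--             acc = [a and (t in txt) for a, txt in zip(acc, texts)]
--         else:
--             acc = [a or (t in txt) for a, txt in zip(acc, texts)]
--     return [r for r, a in zip(rows, acc) if a]
-- ===== Notes on version B (the rewrite author's own statement) =====
-- stated objective: alternative
-- what changed: Row-major loop (build per-row hit list, then all/any) replaced by a term-major sweep: texts are lowered once into a parallel list, a per-row boolean accumulator is folded over the terms, and the surviving rows are selected by a final zip-filter.
import Mathlib
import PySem

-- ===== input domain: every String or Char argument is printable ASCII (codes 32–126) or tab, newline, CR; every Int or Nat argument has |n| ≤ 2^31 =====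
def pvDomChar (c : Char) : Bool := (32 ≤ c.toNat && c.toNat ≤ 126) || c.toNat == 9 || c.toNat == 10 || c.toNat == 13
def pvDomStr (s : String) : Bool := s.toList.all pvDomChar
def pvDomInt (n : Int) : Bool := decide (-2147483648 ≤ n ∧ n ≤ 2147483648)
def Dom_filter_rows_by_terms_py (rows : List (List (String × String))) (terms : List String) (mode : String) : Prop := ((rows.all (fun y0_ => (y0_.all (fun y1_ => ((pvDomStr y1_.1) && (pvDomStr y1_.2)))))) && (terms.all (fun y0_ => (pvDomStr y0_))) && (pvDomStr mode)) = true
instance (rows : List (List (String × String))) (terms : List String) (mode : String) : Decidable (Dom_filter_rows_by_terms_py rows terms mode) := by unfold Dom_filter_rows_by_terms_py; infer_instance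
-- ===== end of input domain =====

-- B is a term-major rewrite of A (each row's text is lowered once and a per-row boolean
-- accumulator is swept over the terms); same return value, row-major loop replaced.

-- ===== PORT A =====
-- txt = (r.get("text") or "").lower()
def pvText (r : List (String × String)) : String :=
  PySem.Str.lower (((PySem.Dict.mk r).get? "text").getD "")

-- tnorm = [t.strip().lower() for t in terms if t and t.strip()]
def pvTnorm (terms : List String) : List String :=
  (terms.filter (fun t => !(t == "") && !(PySem.Str.strip t == ""))).map
    (fun t => PySem.Str.lower (PySem.Str.strip t))

def filter_rows_by_terms_py (rows : List (List (String × String))) (terms : List String) (mode : String) : List (List (String × String)) :=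
  if rows.isEmpty || terms.isEmpty then []
  else
    let tnorm := pvTnorm terms
    if tnorm.isEmpty then []
    else
      rows.foldl (fun out r =>
        let txt := pvText r
        let hits := tnorm.map (fun t => PySem.Str.isIn t txt)
        let ok := if mode == "AND" then hits.all id else hits.any id
        if ok then out ++ [r] else out) []

-- ===== PORT B =====
def filter_rows_by_terms_py_alt (rows : List (List (String × String))) (terms : List String) (mode : String) : List (List (String × String)) :=
  if rows.isEmpty || terms.isEmpty then []
  else
    let tnorm := pvTnorm terms
    if tnorm.isEmpty then []
    else
      let texts := rows.map pvText
      let conj := mode == "AND"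
      let acc := tnorm.foldl (fun acc t =>
        if conj then (acc.zip texts).map (fun p => p.1 && PySem.Str.isIn t p.2)
        else (acc.zip texts).map (fun p => p.1 || PySem.Str.isIn t p.2))
        (List.replicate rows.length conj)
      ((rows.zip acc).filter (fun p => p.2)).map (fun p => p.1)

-- ===== PRECONDITION & SPEC =====
def Spec_filter_rows_by_terms_py (rows : List (List (String × String))) (terms : List String) (mode : String) (out : List (List (String × String))) : Prop := out = filter_rows_by_terms_py_alt rows terms mode
instance (rows : List (List (String × String))) (terms : List String) (mode : String) (out : List (List (String × String))) : Decidable (Spec_filter_rows_by_terms_py rows terms mode out) := by unfold Spec_filter_rows_by_terms_py; infer_instance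

-- ===== CLAIM (what is proved, stated in full; the proofs are below) =====
def Claim_equal_filter_rows_by_terms_py : Prop := ∀ (rows : List (List (String × String))) (terms : List String) (mode : String), Dom_filter_rows_by_terms_py rows terms mode → Spec_filter_rows_by_terms_py rows terms mode (filter_rows_by_terms_py rows terms mode)

-- ===== LEMMAS AND PROOFS =====

-- zipping a mapped list with its source and mapping pointwise is a single map
lemma zip_map_self {α β : Type} (texts : List α) (g : α → Bool) (f : Bool → α → β) :
    ((texts.map g).zip texts).map (fun p => f p.1 p.2) = texts.map (fun txt => f (g txt) txt) := by
  induction texts with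
  | nil => rfl
  | cons x xs ih => simp [ih]

-- the term-major fold keeps the accumulator a pointwise map over the texts
lemma fold_pointwise (op : Bool → Bool → Bool) (ts texts : List String) (g : String → Bool) :
    ts.foldl (fun acc t => (acc.zip texts).map (fun p => op p.1 (PySem.Str.isIn t p.2)))
      (texts.map g)
    = texts.map (fun txt => ts.foldl (fun b t => op b (PySem.Str.isIn t txt)) (g txt)) := by
  induction ts generalizing g with
  | nil => rfl
  | cons t ts ih =>
    simp only [List.foldl_cons]
    rw [zip_map_self texts g (fun b txt => op b (PySem.Str.isIn t txt)), ih]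

lemma foldl_and_eq_all {α : Type} (p : α → Bool) (ts : List α) (b : Bool) :
    ts.foldl (fun b t => b && p t) b = (b && ts.all p) := by
  induction ts generalizing b with
  | nil => simp
  | cons t ts ih => simp [ih, Bool.and_assoc]

lemma foldl_or_eq_any {α : Type} (p : α → Bool) (ts : List α) (b : Bool) :
    ts.foldl (fun b t => b || p t) b = (b || ts.any p) := by
  induction ts generalizing b with
  | nil => simp
  | cons t ts ih => simp [ih, Bool.or_assoc]

lemma replicate_eq_map_map {α β : Type} (xs : List α) (f : α → β) (c : Bool) :
    List.replicate xs.length c = (xs.map f).map (fun _ => c) := by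
  induction xs with
  | nil => rfl
  | cons x xs ih => simpa [List.replicate_succ] using ih

lemma zip_map_filter {α : Type} (rows : List α) (q : α → Bool) :
    ((rows.zip (rows.map q)).filter (fun p => p.2)).map (fun p => p.1) = rows.filter q := by
  induction rows with
  | nil => rfl
  | cons r rs ih =>
    by_cases h : q r = true <;> simp [h, ih]

-- ===== VERDICT (by name: the statement is the Claim_ definition above) =====
theorem filter_rows_by_terms_py_spec : Claim_equal_filter_rows_by_terms_py := by
  intro rows terms mode _
  unfold Spec_filter_rows_by_terms_py filter_rows_by_terms_py filter_rows_by_terms_py_alt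
  by_cases hge : (rows.isEmpty || terms.isEmpty) = true
  · simp [hge]
  · simp only [hge, Bool.false_eq_true, if_false]
    by_cases htn : (pvTnorm terms).isEmpty = true
    · simp [htn]
    · simp only [htn, Bool.false_eq_true, if_false]
      rw [PySem.List.foldl_append_ite_eq_filter]
      simp only [List.nil_append]
      have hrepl := replicate_eq_map_map rows pvText
      by_cases hm : (mode == "AND") = true
      · simp only [hm, if_true]
        rw [hrepl true,
          fold_pointwise (· && ·) (pvTnorm terms) (rows.map pvText) (fun _ => true),
          List.map_map, zip_map_filter]
        apply List.filter_congr
        intro r _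
        simp [Function.comp, foldl_and_eq_all, List.all_map]
        exact Eq.symm List.all_eq
      · simp only [hm, Bool.false_eq_true, if_false]
        rw [hrepl false,
          fold_pointwise (· || ·) (pvTnorm terms) (rows.map pvText) (fun _ => false),
          List.map_map, zip_map_filter]
        apply List.filter_congr
        intro r _
        simp [Function.comp, foldl_or_eq_any, List.any_map]
        exact Eq.symm List.any_eq
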